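-- pv_equiv track=rewrite | github.com/andalenavals/Un_courses_and_projects | challenge/google/3/queue-to-do/queue-to-do_submit.py | solution
-- ===== SOURCE A (Python) =====
-- def solution(start,length):
--     r=0
--     if start%2==0:
--         if length%2==0:
--             if length%4>0: r=1
--             for i in range(length//2):
--                 r^=2*(length-1)*(i+1)+start
--         else:
--             if (length-1)%4>0: r=1
--             for i in range(length):
--                 r^=(length-1)*(i+1)+start
--             for i in range(length//2):
--                 r^=length*(2*i+1)+start
--     else:
--         if length%2==0:
--             for i in range(length):
--                 r^=length*i+start
--             for i in range(length//2):
--                 r^=(length-1)*(2*i+1)+start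
--         else:
--             for i in range((length+1)//2):
--                 r^=length*2*i+start
--     return r
-- ===== SOURCE B (Python) =====
-- def solution(start, length):
--     # Row-wise checksum: XOR each row's run of consecutive IDs in O(1).
--     def run_xor(b, m):
--         # XOR of the m consecutive integers b, b+1, ..., b+m-1
--         if m <= 0:
--             return 0
--         r = 0
--         if b % 2:
--             r ^= b
--             b += 1
--             m -= 1
--         if (m // 2) % 2:
--             r ^= 1
--         if m % 2:
--             r ^= b + m - 1
--         return r
--     r = 0
--     for i in range(length):
--         r ^= run_xor(start + i * length, length - i)
--     return r
-- ===== Notes on version B (the rewrite author's own statement) =====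
-- stated objective: alternative
-- what changed: B replaces A's four parity-cased precomputed loop formulas with a row-wise sweep of the triangular grid that XORs each row's run of consecutive integers via a constant-time run_xor helper.
-- intended difference: For negative length with even start and length % 4 in {2,3}, A returns 1 (its precomputed parity bit survives the empty loops) while B returns 0, the XOR of the empty grid, which is the intended checksum when the queue has no elements. — e.g. on solution(0, -2): A returns 1, B returns 0
import Mathlib
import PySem

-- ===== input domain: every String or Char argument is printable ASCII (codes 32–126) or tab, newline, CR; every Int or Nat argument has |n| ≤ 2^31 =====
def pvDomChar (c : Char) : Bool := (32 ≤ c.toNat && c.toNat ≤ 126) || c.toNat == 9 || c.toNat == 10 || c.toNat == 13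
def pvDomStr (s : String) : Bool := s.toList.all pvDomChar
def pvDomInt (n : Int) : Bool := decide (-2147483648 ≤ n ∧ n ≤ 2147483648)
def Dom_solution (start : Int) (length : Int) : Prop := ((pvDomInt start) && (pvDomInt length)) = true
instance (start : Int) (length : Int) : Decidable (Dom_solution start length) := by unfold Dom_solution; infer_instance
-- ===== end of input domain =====

-- B replaces A's four parity-cased precomputed loop formulas with a row-wise sweep of
-- the triangular grid, XORing each row's consecutive run via a constant-time helper
-- (an alternative implementation, no speed claim); on the degenerate negative lengths
-- described at D_solution, B returns the intended 0.


-- ===== PORT A =====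
def solution (start : Int) (length : Int) : Int :=
  if PySem.Int.mod start 2 = 0 then
    if PySem.Int.mod length 2 = 0 then
      let r : Int := if PySem.Int.mod length 4 > 0 then 1 else 0
      (PySem.List.pyRange 0 (PySem.Int.floordiv length 2) 1).foldl
        (fun r i => PySem.Int.bxor r (2 * (length - 1) * (i + 1) + start)) r
    else
      let r : Int := if PySem.Int.mod (length - 1) 4 > 0 then 1 else 0
      let r := (PySem.List.pyRange 0 length 1).foldl
        (fun r i => PySem.Int.bxor r ((length - 1) * (i + 1) + start)) r
      (PySem.List.pyRange 0 (PySem.Int.floordiv length 2) 1).foldl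
        (fun r i => PySem.Int.bxor r (length * (2 * i + 1) + start)) r
  else
    if PySem.Int.mod length 2 = 0 then
      let r := (PySem.List.pyRange 0 length 1).foldl
        (fun r i => PySem.Int.bxor r (length * i + start)) (0 : Int)
      (PySem.List.pyRange 0 (PySem.Int.floordiv length 2) 1).foldl
        (fun r i => PySem.Int.bxor r ((length - 1) * (2 * i + 1) + start)) r
    else
      (PySem.List.pyRange 0 (PySem.Int.floordiv (length + 1) 2) 1).foldl
        (fun r i => PySem.Int.bxor r (length * 2 * i + start)) (0 : Int)

-- ===== PORT B =====
-- run_xor(b, m): XOR of the m consecutive integers b, b+1, ..., b+m-1 (O(1))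
def runXor (b m : Int) : Int :=
  if m ≤ 0 then 0
  else
    let r : Int := 0
    let r2 := if PySem.Int.mod b 2 ≠ 0 then PySem.Int.bxor r b else r
    let b2 := if PySem.Int.mod b 2 ≠ 0 then b + 1 else b
    let m2 := if PySem.Int.mod b 2 ≠ 0 then m - 1 else m
    let r3 := if PySem.Int.mod (PySem.Int.floordiv m2 2) 2 ≠ 0 then PySem.Int.bxor r2 1 else r2
    if PySem.Int.mod m2 2 ≠ 0 then PySem.Int.bxor r3 (b2 + m2 - 1) else r3

def solution_alt (start : Int) (length : Int) : Int :=
  (PySem.List.pyRange 0 length 1).foldl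
    (fun r i => PySem.Int.bxor r (runXor (start + i * length) (length - i))) 0

-- ===== PRECONDITION & SPEC =====
-- For negative length with even start and length % 4 in {2,3}, A returns 1 (its
-- precomputed parity bit survives the empty loops) while B returns 0, the XOR of the
-- empty grid, which is the intended checksum when the queue has no elements.
def D_solution (start : Int) (length : Int) : Prop :=
  start % 2 = 0 ∧ length < 0 ∧ (length % 4 = 2 ∨ length % 4 = 3)
instance (start : Int) (length : Int) : Decidable (D_solution start length) := by
  unfold D_solution; infer_instance

def Spec_solution (start : Int) (length : Int) (out : Int) : Prop :=
  ¬ D_solution start length → out = solution_alt start length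
instance (start : Int) (length : Int) (out : Int) : Decidable (Spec_solution start length out) := by
  unfold Spec_solution; infer_instance

def pvDiffWitness_solution : Int × Int := (0, -2)
def pvDiffWitnessOut_solution : Int × Int := (1, 0)

-- ===== CLAIM (what is proved, stated in full; the proofs are below) =====
def Claim_unchanged_solution : Prop := ∀ (start : Int) (length : Int), Dom_solution start length → Spec_solution start length (solution start length)
def Claim_changed_solution : Prop := Dom_solution (pvDiffWitness_solution.1) (pvDiffWitness_solution.2) ∧ D_solution (pvDiffWitness_solution.1) (pvDiffWitness_solution.2) ∧ solution (pvDiffWitness_solution.1) (pvDiffWitness_solution.2) = pvDiffWitnessOut_solution.1 ∧ solution_alt (pvDiffWitness_solution.1) (pvDiffWitness_solution.2) = pvDiffWitnessOut_solution.2 ∧ pvDiffWitnessOut_solution.1 ≠ pvDiffWitnessOut_solution.2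
def Claim_exact_solution : Prop := ∀ (start : Int) (length : Int), Dom_solution start length → D_solution start length → solution start length ≠ solution_alt start length

-- ===== LEMMAS AND PROOFS =====

def pvDec (p : Bool) (n : Nat) : Int := if p then -(n : Int) - 1 else n

theorem bxor_dec (p q : Bool) (n m : Nat) :
    PySem.Int.bxor (pvDec p n) (pvDec q m) = pvDec (p ^^ q) (n ^^^ m) := by
  cases p <;> cases q <;> simp [pvDec, PySem.Int.bxor] <;>
    first
      | (intros; exfalso; omega)
      | (split_ifs <;> omega)

theorem nat_pair_xor (k : Nat) : (2 * k) ^^^ (2 * k + 1) = 1 := by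
  apply Nat.eq_of_testBit_eq
  intro i
  cases i with
  | zero => simp [Nat.testBit_zero]
  | succ i =>
    rw [Nat.testBit_xor, Nat.testBit_succ, Nat.testBit_succ, Nat.testBit_succ]
    have h1 : 2 * k / 2 = k := by omega
    have h2 : (2 * k + 1) / 2 = k := by omega
    have h3 : 1 / 2 = 0 := by omega
    simp [h1, h2, h3]

theorem exists_dec (a : Int) : ∃ p n, a = pvDec p n := by
  by_cases h : 0 ≤ a
  · exact ⟨false, a.toNat, by simp [pvDec]; omega⟩
  · exact ⟨true, (-a - 1).toNat, by simp [pvDec]; omega⟩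

theorem bxor_assoc (a b c : Int) :
    PySem.Int.bxor (PySem.Int.bxor a b) c = PySem.Int.bxor a (PySem.Int.bxor b c) := by
  obtain ⟨p, n, rfl⟩ := exists_dec a
  obtain ⟨q, m, rfl⟩ := exists_dec b
  obtain ⟨r, k, rfl⟩ := exists_dec c
  rw [bxor_dec, bxor_dec, bxor_dec, bxor_dec, Bool.xor_assoc, Nat.xor_assoc]

theorem bxor_left_comm (a b c : Int) :
    PySem.Int.bxor a (PySem.Int.bxor b c) = PySem.Int.bxor b (PySem.Int.bxor a c) := by
  rw [← bxor_assoc, PySem.Int.bxor_comm a b, bxor_assoc]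

theorem zero_bxor (a : Int) : PySem.Int.bxor 0 a = a := by
  rw [PySem.Int.bxor_comm]; exact PySem.Int.bxor_zero a

theorem bxor_even_succ (a : Int) (h : 2 ∣ a) : PySem.Int.bxor a (a + 1) = 1 := by
  by_cases h0 : 0 ≤ a
  · obtain ⟨k, hk⟩ : ∃ k : Nat, a = 2 * k := ⟨a.toNat / 2, by omega⟩
    have h1 : a = pvDec false (2 * k) := by simp [pvDec]; omega
    have h2 : a + 1 = pvDec false (2 * k + 1) := by simp [pvDec]; push_cast; omega
    rw [h2, h1, bxor_dec, nat_pair_xor]; rfl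
  · obtain ⟨k, hk⟩ : ∃ k : Nat, a = -(2 * (k : Int)) - 2 := ⟨(-a - 2).toNat / 2, by omega⟩
    have h1 : a = pvDec true (2 * k + 1) := by simp [pvDec]; push_cast; omega
    have h2 : a + 1 = pvDec true (2 * k) := by simp [pvDec]; push_cast; omega
    rw [h2, h1, bxor_dec, Nat.xor_comm, nat_pair_xor]; rfl

def cOdd (t : Nat) : Int := if t % 2 = 1 then 1 else 0

def bigX (f : Nat → Int) : Nat → Int
  | 0 => 0
  | n + 1 => PySem.Int.bxor (bigX f n) (f n)

def rowX (b : Int) : Nat → Int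
  | 0 => 0
  | m + 1 => PySem.Int.bxor (rowX b m) (b + m)

theorem cOdd_succ (t : Nat) : cOdd (t + 1) = PySem.Int.bxor (cOdd t) 1 := by
  by_cases h : t % 2 = 1
  · have h2 : (t + 1) % 2 = 0 := by omega
    simp [cOdd, h, h2]; try decide
  · have h2 : (t + 1) % 2 = 1 := by omega
    simp [cOdd, h, h2]; try decide

-- rowX closed forms
theorem rowX_shift (b : Int) (m : Nat) : rowX b (m + 1) = PySem.Int.bxor b (rowX (b + 1) m) := by
  induction m with
  | zero => simp [rowX, PySem.Int.bxor_zero, zero_bxor]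
  | succ m ih =>
    show PySem.Int.bxor (rowX b (m + 1)) (b + ↑(m + 1)) = _
    rw [ih]
    show _ = PySem.Int.bxor b (PySem.Int.bxor (rowX (b + 1) m) (b + 1 + ↑m))
    rw [bxor_assoc]
    congr 1
    push_cast; ring_nf

theorem rowX_even (b : Int) (h : 2 ∣ b) (t : Nat) : rowX b (2 * t) = cOdd t := by
  induction t with
  | zero => simp [rowX, cOdd]
  | succ t ih =>
    have e : 2 * (t + 1) = (2 * t + 1) + 1 := by omega
    rw [e]
    show PySem.Int.bxor (rowX b (2 * t + 1)) (b + ↑(2 * t + 1)) = _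
    show PySem.Int.bxor (PySem.Int.bxor (rowX b (2 * t)) (b + ↑(2 * t))) (b + ↑(2 * t + 1)) = _
    rw [ih, bxor_assoc]
    have hp : PySem.Int.bxor (b + ↑(2 * t)) (b + ↑(2 * t + 1)) = 1 := by
      have : (b + ↑(2 * t + 1) : Int) = (b + ↑(2 * t)) + 1 := by push_cast; ring
      rw [this]
      exact bxor_even_succ _ (by obtain ⟨c, hc⟩ := h; exact ⟨c + t, by push_cast; omega⟩)
    rw [hp, ← cOdd_succ]

theorem rowX_even_odd (b : Int) (h : 2 ∣ b) (t : Nat) :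
    rowX b (2 * t + 1) = PySem.Int.bxor (cOdd t) (b + ↑(2 * t)) := by
  show PySem.Int.bxor (rowX b (2 * t)) (b + ↑(2 * t)) = _
  rw [rowX_even b h t]

theorem rowX_odd_odd (b : Int) (h : 2 ∣ (b + 1)) (t : Nat) :
    rowX b (2 * t + 1) = PySem.Int.bxor b (cOdd t) := by
  rw [rowX_shift, rowX_even (b + 1) h t]

theorem rowX_odd_even (b : Int) (h : 2 ∣ (b + 1)) (t : Nat) :
    rowX b (2 * t + 2) = PySem.Int.bxor b (PySem.Int.bxor (cOdd t) (b + 1 + ↑(2 * t))) := by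
  have e : 2 * t + 2 = (2 * t + 1) + 1 := by omega
  rw [e, rowX_shift, rowX_even_odd (b + 1) h t]

-- bigX lemmas
theorem bigX_congr (f g : Nat → Int) (n : Nat) (h : ∀ k, k < n → f k = g k) :
    bigX f n = bigX g n := by
  induction n with
  | zero => rfl
  | succ n ih =>
    show PySem.Int.bxor (bigX f n) (f n) = PySem.Int.bxor (bigX g n) (g n)
    rw [ih (fun k hk => h k (by omega)), h n (by omega)]

theorem bigX_bxor (f g : Nat → Int) (n : Nat) :
    bigX (fun k => PySem.Int.bxor (f k) (g k)) n = PySem.Int.bxor (bigX f n) (bigX g n) := by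
  induction n with
  | zero => show (0 : Int) = PySem.Int.bxor 0 0; decide
  | succ n ih =>
    show PySem.Int.bxor (bigX _ n) _ = _
    rw [ih]
    show _ = PySem.Int.bxor (PySem.Int.bxor (bigX f n) (f n)) (PySem.Int.bxor (bigX g n) (g n))
    rw [bxor_assoc, bxor_assoc, bxor_left_comm (f n)]

theorem bigX_one (n : Nat) : bigX (fun _ => 1) n = cOdd n := by
  induction n with
  | zero => rfl
  | succ n ih =>
    show PySem.Int.bxor (bigX _ n) 1 = _
    rw [ih, ← cOdd_succ]

theorem bigX_pair (f : Nat → Int) (u : Nat) :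
    bigX f (2 * u) = bigX (fun k => PySem.Int.bxor (f (2 * k)) (f (2 * k + 1))) u := by
  induction u with
  | zero => rfl
  | succ u ih =>
    have e : 2 * (u + 1) = (2 * u + 1) + 1 := by omega
    rw [e]
    show PySem.Int.bxor (PySem.Int.bxor (bigX f (2 * u)) (f (2 * u))) (f (2 * u + 1)) = _
    rw [ih, bxor_assoc]
    rfl

theorem foldl_bxor_pyRange (f : Int → Int) (b init : Int) :
    (PySem.List.pyRange 0 b 1).foldl (fun r i => PySem.Int.bxor r (f i)) init
      = PySem.Int.bxor init (bigX (fun k => f ↑k) b.toNat) := by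
  rw [PySem.List.pyRange_one]
  have hb : (b - 0).toNat = b.toNat := by simp
  rw [hb]
  induction b.toNat with
  | zero => simp [bigX, PySem.Int.bxor_zero]
  | succ n ih =>
    rw [List.range_succ, List.map_append, List.foldl_append, ih]
    show PySem.Int.bxor (PySem.Int.bxor init (bigX _ n)) (f (0 + ↑n))
      = PySem.Int.bxor init (PySem.Int.bxor (bigX _ n) (f ↑n))
    rw [bxor_assoc, zero_add]

theorem ite_cOdd (t : Nat) (x : Int) :
    (if ((t % 2 : Nat) : Int) ≠ 0 then PySem.Int.bxor x 1 else x) = PySem.Int.bxor x (cOdd t) := by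
  by_cases h : t % 2 = 1
  · rw [if_pos (by rw [h]; norm_num)]; simp [cOdd, h]
  · have h0 : t % 2 = 0 := by omega
    rw [if_neg (by rw [h0]; norm_num)]; simp [cOdd, h, PySem.Int.bxor_zero]

theorem runXor_eq (b : Int) (m : Nat) : runXor b ↑m = rowX b m := by
  rcases Nat.eq_zero_or_pos m with hm | hm
  · subst hm; simp [runXor, rowX]
  unfold runXor
  rw [if_neg (by omega : ¬ ((m : Nat) : Int) ≤ 0)]
  have hmb : PySem.Int.mod b 2 = b % 2 := PySem.Int.mod_eq_emod_of_pos (by norm_num)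
  rcases Int.emod_two_eq b with hb | hb
  · -- b even: the first branch is skipped
    have hdvd : (2 : Int) ∣ b := ⟨b / 2, by omega⟩
    rw [hmb, hb]
    simp only [ne_eq, not_true_eq_false, if_false]
    have hfd : PySem.Int.floordiv ((m : Nat) : Int) 2 = ((m / 2 : Nat) : Int) := by
      rw [PySem.Int.floordiv_eq_ediv_of_pos (by norm_num)]; omega
    have hm2 : PySem.Int.mod ((m / 2 : Nat) : Int) 2 = ((m / 2 % 2 : Nat) : Int) := by
      rw [PySem.Int.mod_eq_emod_of_pos (by norm_num)]; omega
    rw [hfd, hm2]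
    rcases Nat.even_or_odd m with ⟨t, ht⟩ | ⟨t, ht⟩
    · obtain rfl : m = 2 * t := by omega
      have hml : PySem.Int.mod ((2 * t : Nat) : Int) 2 = 0 := by
        rw [PySem.Int.mod_eq_emod_of_pos (by norm_num)]; omega
      have hh : (2 * t) / 2 % 2 = t % 2 := by omega
      rw [hh, ite_cOdd, zero_bxor, hml, if_neg (by norm_num), rowX_even b hdvd t]
    · obtain rfl : m = 2 * t + 1 := by omega
      have hml : PySem.Int.mod ((2 * t + 1 : Nat) : Int) 2 = 1 := by
        rw [PySem.Int.mod_eq_emod_of_pos (by norm_num)]; omega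
      have hh : (2 * t + 1) / 2 % 2 = t % 2 := by omega
      have harg : (b + ((2 * t + 1 : Nat) : Int) - 1) = b + ((2 * t : Nat) : Int) := by
        push_cast; ring
      rw [hh, ite_cOdd, zero_bxor, hml, if_pos (by norm_num), harg,
        rowX_even_odd b hdvd t]
  · -- b odd: the run is shifted to start at the even b + 1
    have hdvd : (2 : Int) ∣ (b + 1) := ⟨(b + 1) / 2, by omega⟩
    rw [hmb, hb]
    simp only [ne_eq, one_ne_zero, not_false_eq_true, if_true]
    rw [zero_bxor]
    have hfd : PySem.Int.floordiv (((m : Nat) : Int) - 1) 2 = (((m - 1) / 2 : Nat) : Int) := by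
      rw [PySem.Int.floordiv_eq_ediv_of_pos (by norm_num)]; omega
    have hm2 : PySem.Int.mod (((m - 1) / 2 : Nat) : Int) 2 = (((m - 1) / 2 % 2 : Nat) : Int) := by
      rw [PySem.Int.mod_eq_emod_of_pos (by norm_num)]; omega
    rw [hfd, hm2]
    rcases Nat.even_or_odd m with ⟨t, ht⟩ | ⟨t, ht⟩
    · -- m = 2t + 2: leftover term present
      obtain ⟨t, rfl⟩ : ∃ t', m = 2 * t' + 2 := ⟨t - 1, by omega⟩
      have hml : PySem.Int.mod (((2 * t + 2 : Nat) : Int) - 1) 2 = 1 := by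
        rw [PySem.Int.mod_eq_emod_of_pos (by norm_num)]; omega
      have hh : (2 * t + 2 - 1) / 2 % 2 = t % 2 := by omega
      have harg : (b + 1 + (((2 * t + 2 : Nat) : Int) - 1) - 1) = b + 1 + ((2 * t : Nat) : Int) := by
        push_cast; ring
      rw [hh, ite_cOdd, hml, if_pos (by norm_num), harg,
        rowX_odd_even b hdvd t, bxor_assoc]
    · obtain rfl : m = 2 * t + 1 := by omega
      have hml : PySem.Int.mod (((2 * t + 1 : Nat) : Int) - 1) 2 = 0 := by
        rw [PySem.Int.mod_eq_emod_of_pos (by norm_num)]; omega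
      have hh : (2 * t + 1 - 1) / 2 % 2 = t % 2 := by omega
      rw [hh, ite_cOdd, hml, if_neg (by norm_num), rowX_odd_odd b hdvd t]

theorem alt_eq (s : Int) (n : Nat) :
    solution_alt s ↑n = bigX (fun k => rowX (s + ↑k * ↑n) (n - k)) n := by
  unfold solution_alt
  rw [foldl_bxor_pyRange (fun i => runXor (s + i * ↑n) (↑n - i)) ↑n 0, zero_bxor,
    Int.toNat_natCast]
  apply bigX_congr
  intro k hk
  have h1 : ((n : Int) - ↑k) = ↑(n - k) := by omega
  rw [h1, runXor_eq]

theorem bxor_cancel_left (a c : Int) : PySem.Int.bxor a (PySem.Int.bxor a c) = c := by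
  rw [← bxor_assoc, PySem.Int.bxor_self, zero_bxor]

theorem rowX_one (b : Int) : rowX b 1 = b := by
  show PySem.Int.bxor (0 : Int) (b + ((0 : Nat) : Int)) = b
  rw [zero_bxor]; norm_num

theorem r0_eq (u : Nat) (m : Int) (hm : m = ↑(2 * u)) :
    (if PySem.Int.mod m 4 > 0 then (1 : Int) else 0) = cOdd u := by
  subst hm
  have h4 : PySem.Int.mod (↑(2 * u)) 4 = ↑((2 * u) % 4) := by
    rw [PySem.Int.mod_eq_emod_of_pos (by norm_num)]; omega
  rw [h4]
  by_cases hu : u % 2 = 1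
  · have h2 : (2 * u) % 4 = 2 := by omega
    rw [h2]; simp [cOdd, hu]
  · have h2 : (2 * u) % 4 = 0 := by omega
    rw [h2]; simp [cOdd, hu]

theorem case1 (s : Int) (u : Nat) (hs : s % 2 = 0) :
    solution s ↑(2 * u) = solution_alt s ↑(2 * u) := by
  obtain ⟨c, hc⟩ : ∃ c : Int, s = 2 * c := ⟨s / 2, by omega⟩
  set n := 2 * u with hn
  have hms : PySem.Int.mod s 2 = 0 := by
    rw [PySem.Int.mod_eq_emod_of_pos (by norm_num)]; exact hs
  have hml : PySem.Int.mod (↑n) 2 = 0 := by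
    rw [PySem.Int.mod_eq_emod_of_pos (by norm_num)]; omega
  have hfd : PySem.Int.floordiv (↑n) 2 = ((u : Nat) : Int) := by
    rw [PySem.Int.floordiv_eq_ediv_of_pos (by norm_num)]; omega
  rw [alt_eq]
  unfold solution
  rw [if_pos hms, if_pos hml, hfd, r0_eq u _ (by rw [hn]),
    foldl_bxor_pyRange (fun i => 2 * ((n : Int) - 1) * (i + 1) + s) _ _, Int.toNat_natCast]
  -- B side
  show _ = bigX (fun k => rowX (s + ↑k * ↑n) (n - k)) (2 * u)
  rw [bigX_pair]
  have hpair : ∀ k, k < u →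
      PySem.Int.bxor (rowX (s + ↑(2 * k) * ↑n) (n - 2 * k))
        (rowX (s + ↑(2 * k + 1) * ↑n) (n - (2 * k + 1)))
      = PySem.Int.bxor 1 (2 * ((n : Int) - 1) * (↑k + 1) + s) := by
    intro k hk
    have h1 : n - 2 * k = 2 * (u - k) := by omega
    have h2 : n - (2 * k + 1) = 2 * (u - k - 1) + 1 := by omega
    rw [h1, h2,
      rowX_even _ ⟨c + ↑k * ↑n, by push_cast [hc]; ring⟩ (u - k),
      rowX_even_odd _ ⟨c + ↑(2 * k + 1) * ↑u, by push_cast [hc, hn]; ring⟩ (u - k - 1)]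
    rw [show (s + ↑(2 * k + 1) * ↑n + ↑(2 * (u - k - 1)) : Int)
        = 2 * ((n : Int) - 1) * (↑k + 1) + s from by
      have hsub : ((2 * (u - k - 1) : Nat) : Int) = 2 * ↑u - 2 * ↑k - 2 := by omega
      rw [hsub]; push_cast [hn]; ring]
    rw [show u - k = (u - k - 1) + 1 from by omega, cOdd_succ]
    simp [bxor_assoc, bxor_left_comm, PySem.Int.bxor_comm, PySem.Int.bxor_self,
      bxor_cancel_left, zero_bxor, PySem.Int.bxor_zero]
  rw [bigX_congr _ _ u hpair]
  simp only [bigX_bxor, bigX_one]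

theorem case2 (s : Int) (u : Nat) (hs : s % 2 = 0) :
    solution s ↑(2 * u + 1) = solution_alt s ↑(2 * u + 1) := by
  obtain ⟨c, hc⟩ : ∃ c : Int, s = 2 * c := ⟨s / 2, by omega⟩
  set n := 2 * u + 1 with hn
  have hms : PySem.Int.mod s 2 = 0 := by
    rw [PySem.Int.mod_eq_emod_of_pos (by norm_num)]; exact hs
  have hml : PySem.Int.mod (↑n) 2 = 1 := by
    rw [PySem.Int.mod_eq_emod_of_pos (by norm_num)]; omega
  have hfd : PySem.Int.floordiv (↑n) 2 = ((u : Nat) : Int) := by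
    rw [PySem.Int.floordiv_eq_ediv_of_pos (by norm_num)]; omega
  rw [alt_eq]
  unfold solution
  rw [if_pos hms, if_neg (by rw [hml]; norm_num), hfd,
    r0_eq u _ (by push_cast [hn]; ring)]
  simp only []
  rw [foldl_bxor_pyRange (fun i => ((n : Int) - 1) * (i + 1) + s) _ _, Int.toNat_natCast,
    foldl_bxor_pyRange (fun i => (n : Int) * (2 * i + 1) + s) _ _, Int.toNat_natCast]
  -- A side: peel last term of the first fold, pair the rest
  rw [show bigX (fun k => ((n : Int) - 1) * (↑k + 1) + s) n
      = PySem.Int.bxor (bigX (fun k => ((n : Int) - 1) * (↑k + 1) + s) (2 * u))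
          (s + ↑(2 * u) * ↑n) from by
    show PySem.Int.bxor (bigX _ (2 * u)) (((n : Int) - 1) * (↑(2 * u) + 1) + s) = _
    congr 1
    push_cast [hn]; ring]
  rw [bigX_pair (fun k => ((n : Int) - 1) * (↑k + 1) + s) u]
  rw [bigX_congr (fun k => PySem.Int.bxor (((n : Int) - 1) * (↑(2 * k) + 1) + s)
        (((n : Int) - 1) * (↑(2 * k + 1) + 1) + s))
      (fun k => PySem.Int.bxor (((n : Int) - 1) * (2 * ↑k + 1) + s)
        (((n : Int) - 1) * (2 * ↑k + 2) + s)) u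
      (fun k _ => by congr 1 <;> (push_cast; ring))]
  -- B side
  show _ = bigX (fun k => rowX (s + ↑k * ↑n) (n - k)) (2 * u + 1)
  show _ = PySem.Int.bxor (bigX (fun k => rowX (s + ↑k * ↑n) (n - k)) (2 * u))
      (rowX (s + ↑(2 * u) * ↑n) (n - 2 * u))
  have hlast : n - 2 * u = 1 := by omega
  rw [hlast, rowX_one, bigX_pair]
  have hpair : ∀ k, k < u →
      PySem.Int.bxor (rowX (s + ↑(2 * k) * ↑n) (n - 2 * k))
        (rowX (s + ↑(2 * k + 1) * ↑n) (n - (2 * k + 1)))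
      = PySem.Int.bxor (PySem.Int.bxor
          (PySem.Int.bxor 1 (((n : Int) - 1) * (2 * ↑k + 1) + s))
          (((n : Int) - 1) * (2 * ↑k + 2) + s))
          ((n : Int) * (2 * ↑k + 1) + s) := by
    intro k hk
    have h1 : n - 2 * k = 2 * (u - k) + 1 := by omega
    have h2 : n - (2 * k + 1) = 2 * (u - k - 1) + 2 := by omega
    rw [h1, h2,
      rowX_even_odd _ ⟨c + ↑k * ↑n, by push_cast [hc]; ring⟩ (u - k),
      rowX_odd_even _ ⟨c + 2 * ↑k * ↑u + ↑k + ↑u + 1, by push_cast [hc, hn]; ring⟩ (u - k - 1)]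
    rw [show (s + ↑(2 * k) * ↑n + ↑(2 * (u - k)) : Int)
        = ((n : Int) - 1) * (2 * ↑k + 1) + s from by
      have hsub : ((2 * (u - k) : Nat) : Int) = 2 * ↑u - 2 * ↑k := by omega
      rw [hsub]; push_cast [hn]; ring]
    rw [show (s + ↑(2 * k + 1) * ↑n + 1 + ↑(2 * (u - k - 1)) : Int)
        = ((n : Int) - 1) * (2 * ↑k + 2) + s from by
      have hsub : ((2 * (u - k - 1) : Nat) : Int) = 2 * ↑u - 2 * ↑k - 2 := by omega
      rw [hsub]; push_cast [hn]; ring]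
    rw [show (s + ↑(2 * k + 1) * ↑n : Int) = (n : Int) * (2 * ↑k + 1) + s from by
      push_cast; ring]
    rw [show u - k = (u - k - 1) + 1 from by omega, cOdd_succ]
    simp [bxor_assoc, bxor_left_comm, PySem.Int.bxor_comm, PySem.Int.bxor_self,
      bxor_cancel_left, zero_bxor, PySem.Int.bxor_zero]
  rw [bigX_congr _ _ u hpair]
  simp only [bigX_bxor, bigX_one]
  simp [bxor_assoc, bxor_left_comm, PySem.Int.bxor_comm]

theorem case3 (s : Int) (u : Nat) (hs : s % 2 = 1) :
    solution s ↑(2 * u) = solution_alt s ↑(2 * u) := by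
  obtain ⟨c, hc⟩ : ∃ c : Int, s = 2 * c + 1 := ⟨(s - 1) / 2, by omega⟩
  set n := 2 * u with hn
  have hms : PySem.Int.mod s 2 = 1 := by
    rw [PySem.Int.mod_eq_emod_of_pos (by norm_num)]; exact hs
  have hml : PySem.Int.mod (↑n) 2 = 0 := by
    rw [PySem.Int.mod_eq_emod_of_pos (by norm_num)]; omega
  have hfd : PySem.Int.floordiv (↑n) 2 = ((u : Nat) : Int) := by
    rw [PySem.Int.floordiv_eq_ediv_of_pos (by norm_num)]; omega
  rw [alt_eq]
  unfold solution
  rw [if_neg (by rw [hms]; norm_num), if_pos hml, hfd]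
  rw [foldl_bxor_pyRange (fun i => (n : Int) * i + s) _ 0, zero_bxor, Int.toNat_natCast,
    foldl_bxor_pyRange (fun i => ((n : Int) - 1) * (2 * i + 1) + s) _ _, Int.toNat_natCast]
  -- pair A's first fold
  show PySem.Int.bxor (bigX (fun k => (n : Int) * ↑k + s) (2 * u)) _ = _
  rw [bigX_pair (fun k => (n : Int) * ↑k + s) u]
  rw [bigX_congr (fun k => PySem.Int.bxor ((n : Int) * ↑(2 * k) + s) ((n : Int) * ↑(2 * k + 1) + s))
      (fun k => PySem.Int.bxor (s + ↑(2 * k) * ↑n) (s + ↑(2 * k + 1) * ↑n)) u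
      (fun k _ => by congr 1 <;> (push_cast; ring))]
  rw [bigX_bxor]
  -- B side
  show _ = bigX (fun k => rowX (s + ↑k * ↑n) (n - k)) (2 * u)
  rw [bigX_pair]
  have hpair : ∀ k, k < u →
      PySem.Int.bxor (rowX (s + ↑(2 * k) * ↑n) (n - 2 * k))
        (rowX (s + ↑(2 * k + 1) * ↑n) (n - (2 * k + 1)))
      = PySem.Int.bxor (PySem.Int.bxor (s + ↑(2 * k) * ↑n) (s + ↑(2 * k + 1) * ↑n))
          (((n : Int) - 1) * (2 * ↑k + 1) + s) := by
    intro k hk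
    have h1 : n - 2 * k = 2 * (u - k - 1) + 2 := by omega
    have h2 : n - (2 * k + 1) = 2 * (u - k - 1) + 1 := by omega
    rw [h1, h2,
      rowX_odd_even _ ⟨c + 1 + ↑k * ↑n, by push_cast [hc]; ring⟩ (u - k - 1),
      rowX_odd_odd _ ⟨c + 1 + ↑k * ↑n + ↑u, by push_cast [hc, hn]; ring⟩ (u - k - 1)]
    rw [show (s + ↑(2 * k) * ↑n + 1 + ↑(2 * (u - k - 1)) : Int)
        = ((n : Int) - 1) * (2 * ↑k + 1) + s from by
      have hsub : ((2 * (u - k - 1) : Nat) : Int) = 2 * ↑u - 2 * ↑k - 2 := by omega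
      rw [hsub]; push_cast [hn]; ring]
    simp [bxor_assoc, bxor_left_comm, PySem.Int.bxor_comm, PySem.Int.bxor_self,
      bxor_cancel_left, zero_bxor, PySem.Int.bxor_zero]
  rw [bigX_congr _ _ u hpair]
  simp only [bigX_bxor]

theorem case4 (s : Int) (u : Nat) (hs : s % 2 = 1) :
    solution s ↑(2 * u + 1) = solution_alt s ↑(2 * u + 1) := by
  obtain ⟨c, hc⟩ : ∃ c : Int, s = 2 * c + 1 := ⟨(s - 1) / 2, by omega⟩
  set n := 2 * u + 1 with hn
  have hms : PySem.Int.mod s 2 = 1 := by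
    rw [PySem.Int.mod_eq_emod_of_pos (by norm_num)]; exact hs
  have hml : PySem.Int.mod (↑n) 2 = 1 := by
    rw [PySem.Int.mod_eq_emod_of_pos (by norm_num)]; omega
  have hfd : PySem.Int.floordiv (↑n + 1) 2 = ((u + 1 : Nat) : Int) := by
    rw [PySem.Int.floordiv_eq_ediv_of_pos (by norm_num)]; omega
  rw [alt_eq]
  unfold solution
  rw [if_neg (by rw [hms]; norm_num), if_neg (by rw [hml]; norm_num), hfd,
    foldl_bxor_pyRange (fun i => (n : Int) * 2 * i + s) _ 0, zero_bxor, Int.toNat_natCast]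
  -- B side: peel the last row, pair the rest
  show _ = bigX (fun k => rowX (s + ↑k * ↑n) (n - k)) (2 * u + 1)
  show _ = PySem.Int.bxor (bigX (fun k => rowX (s + ↑k * ↑n) (n - k)) (2 * u))
      (rowX (s + ↑(2 * u) * ↑n) (n - 2 * u))
  have hlast : n - 2 * u = 1 := by omega
  rw [hlast, rowX_one, bigX_pair]
  have hpair : ∀ k, k < u →
      PySem.Int.bxor (rowX (s + ↑(2 * k) * ↑n) (n - 2 * k))
        (rowX (s + ↑(2 * k + 1) * ↑n) (n - (2 * k + 1)))
      = s + ↑(2 * k) * ↑n := by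
    intro k hk
    have h1 : n - 2 * k = 2 * (u - k) + 1 := by omega
    have h2 : n - (2 * k + 1) = 2 * (u - k) := by omega
    rw [h1, h2,
      rowX_odd_odd _ ⟨c + 1 + ↑k * ↑n, by push_cast [hc]; ring⟩ (u - k),
      rowX_even _ ⟨c + 2 * ↑k * ↑u + ↑k + ↑u + 1, by push_cast [hc, hn]; ring⟩ (u - k),
      bxor_assoc, PySem.Int.bxor_self, PySem.Int.bxor_zero]
  rw [bigX_congr _ _ u hpair]
  -- A side: bigX over u+1 = bigX over u ⊕ last term
  show PySem.Int.bxor (bigX (fun k => (n : Int) * 2 * ↑k + s) u) ((n : Int) * 2 * ↑u + s) = _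
  rw [bigX_congr (fun k => (n : Int) * 2 * ↑k + s) (fun k => s + ↑(2 * k) * ↑n) u
    (by intro k hk; push_cast; ring)]
  congr 1
  push_cast; ring

theorem main_unchanged : ∀ (start length : Int), ¬ D_solution start length →
    solution start length = solution_alt start length := by
  intro s l hD
  by_cases hl : 0 ≤ l
  · obtain ⟨n, rfl⟩ : ∃ n : Nat, l = ↑n := ⟨l.toNat, by omega⟩
    rcases Int.emod_two_eq s with hs | hs
    · rcases Nat.even_or_odd n with ⟨u, hu⟩ | ⟨u, hu⟩
      · rw [show n = 2 * u from by omega]; exact case1 s u hs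
      · rw [show n = 2 * u + 1 from by omega]; exact case2 s u hs
    · rcases Nat.even_or_odd n with ⟨u, hu⟩ | ⟨u, hu⟩
      · rw [show n = 2 * u from by omega]; exact case3 s u hs
      · rw [show n = 2 * u + 1 from by omega]; exact case4 s u hs
  · -- negative length: every loop is empty
    have halt : solution_alt s l = 0 := by
      unfold solution_alt
      rw [PySem.List.pyRange_one_eq_nil (by omega : l ≤ 0)]
      rfl
    rw [halt]
    unfold solution
    have hnil2 : PySem.List.pyRange 0 (PySem.Int.floordiv l 2) 1 = [] := by
      rw [PySem.Int.floordiv_eq_ediv_of_pos (by norm_num)]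
      exact PySem.List.pyRange_one_eq_nil (by omega)
    have hnill : PySem.List.pyRange 0 l 1 = [] :=
      PySem.List.pyRange_one_eq_nil (by omega)
    by_cases hs : s % 2 = 0
    · have hms : PySem.Int.mod s 2 = 0 := by
        rw [PySem.Int.mod_eq_emod_of_pos (by norm_num)]; exact hs
      have h4 : l % 4 = 0 ∨ l % 4 = 1 := by
        unfold D_solution at hD
        push_neg at hD
        have := hD hs (by omega)
        omega
      rw [if_pos hms]
      by_cases hl2 : l % 2 = 0
      · have hml : PySem.Int.mod l 2 = 0 := by
          rw [PySem.Int.mod_eq_emod_of_pos (by norm_num)]; exact hl2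
        have hm4 : PySem.Int.mod l 4 = 0 := by
          rw [PySem.Int.mod_eq_emod_of_pos (by norm_num)]; omega
        rw [if_pos hml, hm4, hnil2]
        norm_num
      · have hml : PySem.Int.mod l 2 = 1 := by
          rw [PySem.Int.mod_eq_emod_of_pos (by norm_num)]; omega
        have hm4 : PySem.Int.mod (l - 1) 4 = 0 := by
          rw [PySem.Int.mod_eq_emod_of_pos (by norm_num)]; omega
        rw [if_neg (by rw [hml]; norm_num), hm4, hnill, hnil2]
        norm_num
    · have hms : PySem.Int.mod s 2 = 1 := by
        rw [PySem.Int.mod_eq_emod_of_pos (by norm_num)]; omega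
      rw [if_neg (by rw [hms]; norm_num)]
      have hnilh : PySem.List.pyRange 0 (PySem.Int.floordiv (l + 1) 2) 1 = [] := by
        rw [PySem.Int.floordiv_eq_ediv_of_pos (by norm_num)]
        exact PySem.List.pyRange_one_eq_nil (by omega)
      by_cases hl2 : PySem.Int.mod l 2 = 0
      · rw [if_pos hl2, hnill, hnil2]
        rfl
      · rw [if_neg hl2, hnilh]
        rfl

theorem main_exact : ∀ (start length : Int), D_solution start length →
    solution start length = 1 ∧ solution_alt start length = 0 := by
  intro s l hD
  obtain ⟨hs, hl, h4⟩ := hD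
  have hms : PySem.Int.mod s 2 = 0 := by
    rw [PySem.Int.mod_eq_emod_of_pos (by norm_num)]; exact hs
  have hnil2 : PySem.List.pyRange 0 (PySem.Int.floordiv l 2) 1 = [] := by
    rw [PySem.Int.floordiv_eq_ediv_of_pos (by norm_num)]
    exact PySem.List.pyRange_one_eq_nil (by omega)
  have hnill : PySem.List.pyRange 0 l 1 = [] :=
    PySem.List.pyRange_one_eq_nil (by omega)
  constructor
  · unfold solution
    rcases h4 with h4 | h4
    · have hml : PySem.Int.mod l 2 = 0 := by
        rw [PySem.Int.mod_eq_emod_of_pos (by norm_num)]; omega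
      have hm4 : PySem.Int.mod l 4 = 2 := by
        rw [PySem.Int.mod_eq_emod_of_pos (by norm_num)]; omega
      rw [if_pos hms, if_pos hml, hm4, hnil2]
      norm_num
    · have hml : PySem.Int.mod l 2 = 1 := by
        rw [PySem.Int.mod_eq_emod_of_pos (by norm_num)]; omega
      have hm4 : PySem.Int.mod (l - 1) 4 = 2 := by
        rw [PySem.Int.mod_eq_emod_of_pos (by norm_num)]; omega
      rw [if_pos hms, if_neg (by rw [hml]; norm_num), hm4, hnill, hnil2]
      norm_num
  · unfold solution_alt
    rw [hnill]
    rfl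

-- ===== VERDICT (by name: the statement is the Claim_ definition above) =====
theorem solution_spec : Claim_unchanged_solution := by
  intro s l _ hD; exact main_unchanged s l hD
theorem solution_changed : Claim_changed_solution := by
  unfold Claim_changed_solution; decide
theorem solution_tight : Claim_exact_solution := by
  intro s l _ hD
  rcases main_exact s l hD with ⟨h1, h2⟩
  rw [h1, h2]; decide
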